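-- pv_equiv track=rewrite | github.com/heluhule/IntroToAutoTest | finding.py | find_second_maximum_matrix
-- ===== SOURCE A (Python) =====
-- def find_second_maximum_matrix(matrix):
--     if not matrix or not matrix[0]:
--         return None  # Return None for an empty matrix or empty rows
--
--     max_values = set()
--
--     for row in matrix:
--         if len(row) > 1:
--             max_values.add(max(row))
--
--     if len(max_values) < 2:
--         return None  # Return None if there are not enough unique maximum values
--
--     max_values.remove(max(max_values))  # Remove the overall maximum to get the second maximum
--     return max(max_values)
-- ===== SOURCE B (Python) =====
-- def find_second_maximum_matrix(matrix):
--     if not matrix or not matrix[0]: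
--         return None
--     best1 = best2 = None
--     for row in matrix:
--         if len(row) > 1:
--             m = max(row)
--             if best1 is None or m > best1:
--                 best1, best2 = m, best1
--             elif m < best1 and (best2 is None or m > best2):
--                 best2 = m
--     return best2
-- ===== Notes on version B (the rewrite author's own statement) =====
-- stated objective: simpler
-- what changed: Replaces A's build-a-set pass followed by two max scans and a remove with a single pass over the rows that folds each qualifying row's maximum into two scalar accumulators holding the two largest distinct row-maxima.
import Mathlib
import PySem

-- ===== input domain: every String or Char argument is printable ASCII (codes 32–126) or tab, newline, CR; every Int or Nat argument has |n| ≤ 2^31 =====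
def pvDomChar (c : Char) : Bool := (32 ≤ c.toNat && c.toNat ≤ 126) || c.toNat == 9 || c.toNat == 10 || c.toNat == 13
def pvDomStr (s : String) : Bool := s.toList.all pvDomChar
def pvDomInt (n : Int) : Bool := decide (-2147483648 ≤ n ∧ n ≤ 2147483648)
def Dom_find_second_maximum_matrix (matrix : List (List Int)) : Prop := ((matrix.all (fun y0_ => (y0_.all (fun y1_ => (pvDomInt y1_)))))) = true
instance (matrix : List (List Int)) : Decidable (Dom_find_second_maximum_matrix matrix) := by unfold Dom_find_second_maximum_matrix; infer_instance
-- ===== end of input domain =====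

-- B replaces A's set-building pass plus two max-scans by a single pass holding the two
-- largest distinct row-maxima in two scalar accumulators (objective: simpler one-pass fold).

-- ===== PORT A =====
def find_second_maximum_matrix (matrix : List (List Int)) : Option Int :=
  if matrix = [] ∨ matrix.headD [] = [] then none
  else
    let max_values : PySem.Set Int :=
      matrix.foldl (fun s row =>
        if 1 < row.length then PySem.Set.add s ((PySem.List.max? row (fun x => x)).getD 0) else s)
        PySem.Set.empty
    if PySem.Set.len max_values < 2 then none
    else
      let overall : Int := (PySem.List.max? max_values (fun x => x)).getD 0
      let rest : PySem.Set Int := (PySem.Set.remove? max_values overall).getD []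
      some ((PySem.List.max? rest (fun x => x)).getD 0)

-- ===== PORT B =====
-- one update step of B's loop body (best1, best2 are the two largest distinct maxima so far)
def fsmStep (st : Option Int × Option Int) (m : Int) : Option Int × Option Int :=
  match st with
  | (none, _) => (some m, none)
  | (some b1, b2) =>
    if b1 < m then (some m, some b1)
    else if m < b1 then
      match b2 with
      | none => (some b1, some m)
      | some b2' => if b2' < m then (some b1, some m) else (some b1, some b2')
    else (some b1, b2)

def find_second_maximum_matrix_alt (matrix : List (List Int)) : Option Int :=
  if matrix = [] ∨ matrix.headD [] = [] then none
  else (matrix.foldl (fun st row =>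
      if 1 < row.length then fsmStep st ((PySem.List.max? row (fun x => x)).getD 0) else st)
    ((none : Option Int), (none : Option Int))).2

-- ===== PRECONDITION & SPEC =====
def Spec_find_second_maximum_matrix (matrix : List (List Int)) (out : Option Int) : Prop := out = find_second_maximum_matrix_alt matrix
instance (matrix : List (List Int)) (out : Option Int) : Decidable (Spec_find_second_maximum_matrix matrix out) := by unfold Spec_find_second_maximum_matrix; infer_instance

-- ===== CLAIM (what is proved, stated in full; the proofs are below) =====
def Claim_equal_find_second_maximum_matrix : Prop := ∀ (matrix : List (List Int)), Dom_find_second_maximum_matrix matrix → Spec_find_second_maximum_matrix matrix (find_second_maximum_matrix matrix)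

-- ===== LEMMAS AND PROOFS =====

-- the list of maxima of the qualifying rows, in order
def pvMs (matrix : List (List Int)) : List Int :=
  (matrix.filter (fun r => 1 < r.length)).map (fun row => (PySem.List.max? row (fun x => x)).getD 0)

-- both loops over the matrix are folds over pvMs
theorem pv_foldl_guard {σ : Type} (f : σ → Int → σ) (matrix : List (List Int)) (init : σ) :
    matrix.foldl (fun st row =>
        if 1 < row.length then f st ((PySem.List.max? row (fun x => x)).getD 0) else st) init
      = (pvMs matrix).foldl f init := by
  induction matrix generalizing init with
  | nil => rfl
  | cons r t ih =>
    simp only [pvMs, List.filter_cons, List.foldl_cons]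
    by_cases h : 1 < r.length <;> simp [h, ih, pvMs]

-- "second distinct maximum" of a list, as a closed expression
def pvSnd (l : List Int) : Option Int :=
  match PySem.List.max? l (fun x => x) with
  | none => none
  | some m => PySem.List.max? (l.filter (fun x => x < m)) (fun x => x)

theorem pv_max?_nil : PySem.List.max? ([] : List Int) (fun x => x) = none := rfl

theorem pv_max?_append_singleton (l : List Int) (a : Int) :
    PySem.List.max? (l ++ [a]) (fun x => x)
      = some (match PySem.List.max? l (fun x => x) with | none => a | some y => max y a) := by
  cases l with
  | nil => simp [pv_max?_nil, PySem.List.max?_id_cons]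
  | cons x t => simp [PySem.List.max?_id_cons, List.foldl_append]

theorem pv_max?_congr (l l' : List Int) (h : ∀ x, x ∈ l ↔ x ∈ l') :
    PySem.List.max? l (fun x => x) = PySem.List.max? l' (fun x => x) := by
  cases hl : PySem.List.max? l (fun x => x) with
  | none =>
    rw [PySem.List.max?_eq_none_iff] at hl
    subst hl
    rcases (PySem.List.max?_eq_none_iff l' (fun x => x)).2 (List.eq_nil_iff_forall_not_mem.2
      (fun x hx => by simpa using (h x).2 hx)) with h'
    exact h'.symm
  | some m =>
    cases hl' : PySem.List.max? l' (fun x => x) with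
    | none =>
      rw [PySem.List.max?_eq_none_iff] at hl'
      subst hl'
      have := (h m).1 (PySem.List.max?_mem hl)
      simp at this
    | some m' =>
      have hm : m ∈ l' := (h m).1 (PySem.List.max?_mem hl)
      have hm' : m' ∈ l := (h m').2 (PySem.List.max?_mem hl')
      have h1 : m ≤ m' := PySem.List.max?_isMax hl' m hm
      have h2 : m' ≤ m := PySem.List.max?_isMax hl m' hm'
      simp [le_antisymm h1 h2]

-- B's fold computes (max, second distinct max)
theorem pv_Bfold (l : List Int) :
    l.foldl fsmStep (none, none) = (PySem.List.max? l (fun x => x), pvSnd l) := by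
  induction l using List.reverseRecOn with
  | nil => rfl
  | append_singleton l a ih =>
    rw [List.foldl_append, ih, List.foldl_cons, List.foldl_nil]
    cases hl : PySem.List.max? l (fun x => x) with
    | none =>
      rw [PySem.List.max?_eq_none_iff] at hl
      subst hl
      simp [fsmStep, pvSnd, pv_max?_nil, PySem.List.max?_id_cons]
    | some b1 =>
      have hmax : ∀ x ∈ l, x ≤ b1 := PySem.List.max?_isMax hl
      have happ : PySem.List.max? (l ++ [a]) (fun x => x) = some (max b1 a) := by
        rw [pv_max?_append_singleton, hl]
      simp only [pvSnd, hl, happ]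
      by_cases h1 : b1 < a
      · -- new max is a; every old element is < a so the filter keeps all of l
        rw [show max b1 a = a from max_eq_right h1.le] at happ ⊢
        have hfa : (l ++ [a]).filter (fun x => x < a) = l := by
          rw [List.filter_append]
          have : l.filter (fun x => x < a) = l :=
            List.filter_eq_self.2 (fun x hx => by
              have := hmax x hx; simp; omega)
          simp [this]
        simp [fsmStep, h1, hfa, hl]
      · by_cases h2 : a < b1
        · -- max stays b1; a joins the filtered list
          rw [show max b1 a = b1 from max_eq_left h2.le]
          have hfa : (l ++ [a]).filter (fun x => x < b1) = l.filter (fun x => x < b1) ++ [a] := by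
            rw [List.filter_append]; simp [h2]
          rw [hfa, pv_max?_append_singleton]
          cases hb2 : PySem.List.max? (l.filter (fun x => x < b1)) (fun x => x) with
          | none => simp [fsmStep, h1, h2]
          | some b2' =>
            by_cases h3 : b2' < a
            · simp [fsmStep, h1, h2, h3, max_eq_right h3.le]
            · simp [fsmStep, h1, h2, h3, max_eq_left (by omega : a ≤ b2')]
        · -- a = b1: nothing changes
          have ha : a = b1 := by omega
          subst ha
          rw [max_self]
          have hfa : (l ++ [a]).filter (fun x => x < a) = l.filter (fun x => x < a) := by
            rw [List.filter_append]; simp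
          simp [fsmStep, hfa]

-- A's set computation on the maxima list equals pvSnd
theorem pv_Aset (ms : List Int) :
    (let S : PySem.Set Int := PySem.Set.ofList ms
     if PySem.Set.len S < 2 then none
     else
       let overall : Int := (PySem.List.max? S (fun x => x)).getD 0
       let rest : PySem.Set Int := (PySem.Set.remove? S overall).getD []
       some ((PySem.List.max? rest (fun x => x)).getD 0))
      = pvSnd ms := by
  cases hms : PySem.List.max? ms (fun x => x) with
  | none =>
    rw [PySem.List.max?_eq_none_iff] at hms
    subst hms
    simp [pvSnd, PySem.Set.ofList, PySem.Set.len, pv_max?_nil]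
  | some m =>
    have hmem : ∀ x, x ∈ PySem.Set.ofList ms ↔ x ∈ ms := fun x => PySem.Set.mem_ofList ms x
    have hMx : PySem.List.max? (PySem.Set.ofList ms) (fun x => x) = some m := by
      rw [pv_max?_congr _ ms hmem, hms]
    have hmS : m ∈ PySem.Set.ofList ms := (hmem m).2 (PySem.List.max?_mem hms)
    have hle : ∀ x ∈ ms, x ≤ m := PySem.List.max?_isMax hms
    have hrest : (PySem.Set.remove? (PySem.Set.ofList ms) m).getD []
        = (PySem.Set.ofList ms).discard m := by
      rw [PySem.Set.remove?_of_mem hmS]; rfl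
    have hdis : ∀ x, x ∈ (PySem.Set.ofList ms).discard m ↔ x ∈ ms.filter (fun x => x < m) := by
      intro x
      rw [PySem.Set.mem_discard, hmem, List.mem_filter]
      constructor
      · rintro ⟨hx, hne⟩
        exact ⟨hx, by have := hle x hx; simp; omega⟩
      · rintro ⟨hx, hlt⟩
        simp at hlt
        exact ⟨hx, by omega⟩
    have hMrest : PySem.List.max? ((PySem.Set.ofList ms).discard m) (fun x => x)
        = PySem.List.max? (ms.filter (fun x => x < m)) (fun x => x) := pv_max?_congr _ _ hdis
    simp only [pvSnd, hms]
    by_cases hlen : PySem.Set.len (PySem.Set.ofList ms) < 2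
    · -- at most one distinct value: every element equals m, the filter is empty
      have hnd := PySem.Set.nodup_ofList ms
      have hlen' : (PySem.Set.ofList ms).length < 2 := by
        simp [PySem.Set.len] at hlen; omega
      have hall : ∀ x ∈ ms, x = m := by
        intro x hx
        have hx' : x ∈ PySem.Set.ofList ms := (hmem x).2 hx
        rcases hS : PySem.Set.ofList ms with _ | ⟨y, _ | ⟨z, t⟩⟩
        · rw [hS] at hmS; simp at hmS
        · rw [hS] at hmS hx'
          simp at hmS hx'
          rw [hx', hmS]
        · rw [hS] at hlen'; simp at hlen' 
      have hfilt : ms.filter (fun x => x < m) = [] := by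
        rw [List.filter_eq_nil_iff]
        intro x hx
        have := hall x hx; simp; omega
      simp [hfilt, pv_max?_nil, show List.length (PySem.Set.ofList ms) ≤ 1 by omega]
    · -- at least two distinct values: the filtered list is nonempty
      have hnd := PySem.Set.nodup_ofList ms
      have hlen2 : 2 ≤ (PySem.Set.ofList ms).length := by
        simp [PySem.Set.len] at hlen; omega
      obtain ⟨x, hxS, hxne⟩ : ∃ x ∈ PySem.Set.ofList ms, x ≠ m := by
        rcases hS : PySem.Set.ofList ms with _ | ⟨a, _ | ⟨b, t⟩⟩
        · rw [hS] at hlen2; simp at hlen2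
        · rw [hS] at hlen2; simp at hlen2
        · rw [hS] at hnd
          have hab : a ≠ b := by simp [List.nodup_cons] at hnd; tauto
          by_cases ham : a = m
          · exact ⟨b, by simp, by rw [← ham]; exact fun h => hab h.symm⟩
          · exact ⟨a, by simp, ham⟩
      have hxf : x ∈ ms.filter (fun x => x < m) := (hdis x).1 (by
        rw [PySem.Set.mem_discard]; exact ⟨hxS, hxne⟩)
      cases hv : PySem.List.max? (ms.filter (fun x => x < m)) (fun x => x) with
      | none =>
        rw [PySem.List.max?_eq_none_iff] at hv
        rw [hv] at hxf; simp at hxf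
      | some v =>
        simp only [if_neg hlen]
        rw [hMx]
        simp only [Option.getD_some]
        rw [hrest, hMrest, hv]
        simp

-- ===== VERDICT (by name: the statement is the Claim_ definition above) =====
theorem find_second_maximum_matrix_spec : Claim_equal_find_second_maximum_matrix := by
  intro matrix _
  unfold Spec_find_second_maximum_matrix find_second_maximum_matrix find_second_maximum_matrix_alt
  by_cases hg : matrix = [] ∨ matrix.headD [] = []
  · rw [if_pos hg, if_pos hg]
  · rw [if_neg hg, if_neg hg]
    rw [pv_foldl_guard PySem.Set.add matrix PySem.Set.empty]
    rw [pv_foldl_guard fsmStep matrix (none, none)]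
    rw [pv_Bfold]
    have := pv_Aset (pvMs matrix)
    simp only [PySem.Set.ofList_eq_foldl] at this
    exact this
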